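-- pv_equiv track=rewrite | github.com/edenkhal/Boggle | ex11_utils.py | _helper_n_paths
-- ===== SOURCE A (Python) =====
-- from typing import List, Tuple, Iterable, Optional
--
-- Board = List[List[str]]
--
-- Path = List[Tuple[int, int]]
--
-- def _helper_n_paths(path :list, n : int, board : Board, lst : list, dict_possible_moves : dict,set_of_subwords :set,words : Iterable,word : str) -> list:
--     """helper function for find n length paths"""
--
--     if word not in set_of_subwords:
--         return
--
--     if len(path) == n:
--         if word in words:
--             lst.append(path[:])
--             return
--         return
--
--     for coordinate in dict_possible_moves[path[-1]]:
--         path.append(coordinate)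
--         if not is_valid_path_n(path):
--             del path[-1]
--             continue
--         _helper_n_paths(path, n, board,lst , dict_possible_moves, set_of_subwords,words, word+board[coordinate[0]][coordinate[1]])
--         del path[-1]
--
--     return lst
--
-- def is_valid_path_n(path: Path) -> Optional[str]:
--     return path.count(path[-1]) == 1
-- ===== SOURCE B (Python) =====
-- def _helper_n_paths(path, n, board, lst, dict_possible_moves, set_of_subwords, words, word):
--     """Explicit-stack iterative search over (path-snapshot, word) states instead of
--     recursion; appends the same items to lst in the same order as the original."""
--     if word not in set_of_subwords:
--         return None
--     if len(path) == n:
--         if word in words: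
--             lst.append(list(path))
--         return None
--     stack = [(list(path), word)]
--     while stack:
--         pth, w = stack.pop()
--         if w not in set_of_subwords:
--             continue
--         if len(pth) == n:
--             if w in words:
--                 lst.append(pth)
--             continue
--         for c in reversed(dict_possible_moves[pth[-1]]):
--             if c not in pth:
--                 stack.append((pth + [c], w + board[c[0]][c[1]]))
--     return lst
-- ===== Notes on version B (the rewrite author's own statement) =====
-- stated objective: alternative
-- what changed: A is a recursive DFS that mutates one shared path (append/del) and rescans it with path.count to reject revisits; B replaces the recursion by an explicit-stack while loop over immutable (path-snapshot, word) states, pushing neighbours in reverse so the output order is preserved, with a plain membership test for revisits.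
import Mathlib
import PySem

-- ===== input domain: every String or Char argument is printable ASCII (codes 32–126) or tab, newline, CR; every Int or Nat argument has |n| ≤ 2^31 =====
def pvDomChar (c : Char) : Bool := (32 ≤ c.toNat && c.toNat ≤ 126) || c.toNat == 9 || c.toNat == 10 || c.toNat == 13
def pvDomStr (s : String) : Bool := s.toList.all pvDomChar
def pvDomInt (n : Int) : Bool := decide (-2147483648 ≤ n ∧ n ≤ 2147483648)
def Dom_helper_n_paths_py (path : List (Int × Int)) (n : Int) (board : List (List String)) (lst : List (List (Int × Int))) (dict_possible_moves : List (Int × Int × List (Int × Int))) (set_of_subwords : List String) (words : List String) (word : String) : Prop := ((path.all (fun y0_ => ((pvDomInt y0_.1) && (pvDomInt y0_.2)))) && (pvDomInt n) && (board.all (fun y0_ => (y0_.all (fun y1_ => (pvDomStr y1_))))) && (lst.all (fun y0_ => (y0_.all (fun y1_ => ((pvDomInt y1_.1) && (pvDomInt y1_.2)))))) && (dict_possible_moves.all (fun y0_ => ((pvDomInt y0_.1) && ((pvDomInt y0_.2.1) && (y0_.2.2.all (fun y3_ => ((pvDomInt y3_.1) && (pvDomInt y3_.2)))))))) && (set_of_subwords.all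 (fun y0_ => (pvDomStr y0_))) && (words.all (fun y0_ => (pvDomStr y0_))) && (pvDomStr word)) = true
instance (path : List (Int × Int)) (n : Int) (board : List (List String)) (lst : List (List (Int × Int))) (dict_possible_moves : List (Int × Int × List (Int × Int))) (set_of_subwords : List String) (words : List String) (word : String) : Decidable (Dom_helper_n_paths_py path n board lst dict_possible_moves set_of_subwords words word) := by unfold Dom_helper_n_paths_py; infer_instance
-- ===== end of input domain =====

-- B replaces A's recursive DFS (mutating a shared path, rescanning it with path.count) by an
-- explicit-stack while loop over (path-snapshot, word) states, pushing neighbours in reverse;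
-- equivalence is about the RETURN value (both Pythons also append the same items to lst).

-- ===== PORT A =====
-- dict_possible_moves[c]  (Python dict lookup, key = the coordinate pair; none = KeyError,
-- excluded by Pre_)
def pvLookupMoves (d : List (Int × Int × List (Int × Int))) (c : Int × Int) : Option (List (Int × Int)) :=
  match d with
  | [] => none
  | (a, b, ms) :: t => if (a, b) = c then some ms else pvLookupMoves t c

-- board[c0][c1] (Python indexing with negative wraparound); returns "" exactly where Python
-- raises IndexError — those inputs are excluded by Pre_
def pvBoardAt (board : List (List String)) (c : Int × Int) : String :=
  ((PySem.List.pyGet? board c.1).bind (fun row => PySem.List.pyGet? row c.2)).getD ""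

-- is_valid_path_n: path.count(path[-1]) == 1 (call sites have path ≠ [], so the (0,0)
-- default of the pyGet? is never used)
def is_valid_path_n (p : List (Int × Int)) : Bool :=
  PySem.List.count p ((PySem.List.pyGet? p (-1)).getD (0, 0)) == 1

-- fuel: each recursive call appends a coordinate that is NOT yet in path and comes from a
-- moves list, so the depth is bounded by the number of move entries; this bound never runs out
def pvFuel (d : List (Int × Int × List (Int × Int))) : Nat :=
  ((d.map (fun e => e.2.2)).flatten).length + 1

-- the body of _helper_n_paths as a transformer of lst (the Python mutates lst in place and
-- finally returns it); missing dict key reads as [] where Python raises (excluded by Pre_)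
def pvDfsA (n : Int) (board : List (List String)) (dict : List (Int × Int × List (Int × Int)))
    (subwords words : List String) :
    Nat → List (Int × Int) → List (List (Int × Int)) → String → List (List (Int × Int))
  | 0, _, lst, _ => lst
  | fuel + 1, path, lst, word =>
    if ¬ subwords.contains word then lst
    else if (path.length : Int) = n then
      (if words.contains word then lst ++ [path] else lst)
    else
      ((pvLookupMoves dict ((PySem.List.pyGet? path (-1)).getD (0, 0))).getD []).foldl
        (fun acc c =>
          if is_valid_path_n (path ++ [c]) then
            pvDfsA n board dict subwords words fuel (path ++ [c]) acc (word ++ pvBoardAt board c)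
          else acc)
        lst

def helper_n_paths_py (path : List (Int × Int)) (n : Int) (board : List (List String)) (lst : List (List (Int × Int))) (dict_possible_moves : List (Int × Int × List (Int × Int))) (set_of_subwords : List String) (words : List String) (word : String) : Option (List (List (Int × Int))) :=
  if ¬ set_of_subwords.contains word then none          -- 'return' (None)
  else if (path.length : Int) = n then none             -- 'return' (None) in both branches
  else some (pvDfsA n board dict_possible_moves set_of_subwords words
               (pvFuel dict_possible_moves) path lst word)

-- ===== PORT B =====
-- termination measure for the while loop: each state carries a fuel counter (children get one
-- less), and a state of fuel f weighs (M+2)^f; expanding pushes at most M children of fuel f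
def pvStackMeasure (M : Nat) (st : List (Nat × List (Int × Int) × String)) : Nat :=
  (st.map (fun e => (M + 2) ^ e.1)).sum

-- pushing 'for c in reversed(moves): if c not in pth: stack.append(...)' onto a head-is-top
-- stack yields the kept children, in original order, in front of the rest
lemma pvPush_eq {α β : Type} (p : β → Bool) (e : β → α) :
    ∀ (L : List β) (rest : List α),
      L.reverse.foldl (fun st c => if p c then st else e c :: st) rest
        = (L.filter (fun c => ¬ p c)).map e ++ rest := by
  intro L
  induction L with
  | nil => intro rest; simp
  | cons c L ih =>
    intro rest
    simp only [List.reverse_cons, List.foldl_append, List.foldl_cons, List.foldl_nil,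
      List.filter_cons, List.map_cons]
    by_cases hc : p c = true
    · simp [hc, ih]
    · simp [hc, ih]

-- any moves list stored in the dict is shorter than the fuel bound
lemma pvMoves_len_lt (d : List (Int × Int × List (Int × Int))) (c : Int × Int) :
    ((pvLookupMoves d c).getD []).length < pvFuel d := by
  induction d with
  | nil => simp [pvLookupMoves, pvFuel]
  | cons e t ih =>
    obtain ⟨a, b, ms⟩ := e
    simp only [pvLookupMoves, pvFuel, List.map_cons, List.flatten_cons, List.length_append]
    split_ifs with h
    · simp
    · have := ih
      simp only [pvFuel] at this
      omega

-- the pushed stack weighs strictly less than the popped state plus the rest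
lemma pvMeasure_push_lt (M f : Nat) (p : (Int × Int) → Bool)
    (e : (Int × Int) → Nat × List (Int × Int) × String) (hf : ∀ c, (e c).1 = f)
    (L : List (Int × Int)) (rest : List (Nat × List (Int × Int) × String))
    (hL : L.length ≤ M + 1) :
    pvStackMeasure M (L.reverse.foldl (fun st c => if p c then st else e c :: st) rest)
      < (M + 2) ^ (f + 1) + pvStackMeasure M rest := by
  rw [pvPush_eq]
  have hlen : (L.filter (fun c => ¬ p c)).length ≤ M + 1 :=
    le_trans (List.length_filter_le _ _) hL
  have hmap : ((L.filter (fun c => ¬ p c)).map e).map (fun x => (M + 2) ^ x.1)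
      = (L.filter (fun c => ¬ p c)).map (fun _ => (M + 2) ^ f) := by
    simp [List.map_map, Function.comp_def, hf]
  simp only [pvStackMeasure, List.map_append, List.sum_append, hmap, List.map_const',
    List.sum_replicate, smul_eq_mul, List.length_map]
  have hpow : 0 < (M + 2) ^ f := Nat.pow_pos (by omega)
  have : (L.filter (fun c => ¬ p c)).length * (M + 2) ^ f < (M + 2) ^ (f + 1) := by
    calc (L.filter (fun c => ¬ p c)).length * (M + 2) ^ f
        ≤ (M + 1) * (M + 2) ^ f := Nat.mul_le_mul_right _ hlen
      _ < (M + 2) * (M + 2) ^ f := by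
          exact (Nat.mul_lt_mul_right hpow).mpr (by omega)
      _ = (M + 2) ^ (f + 1) := by ring
  omega

-- popping a state strictly decreases the stack measure
lemma pvMeasure_cons_lt (M : Nat) (e : Nat × List (Int × Int) × String)
    (rest : List (Nat × List (Int × Int) × String)) :
    pvStackMeasure M rest < pvStackMeasure M (e :: rest) := by
  have hp : 0 < (M + 2) ^ e.1 := Nat.pow_pos (by omega)
  simp only [pvStackMeasure, List.map_cons, List.sum_cons]
  omega

-- expanding a state strictly decreases the stack measure
lemma pvMeasure_expand_lt (board : List (List String)) (dict : List (Int × Int × List (Int × Int)))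
    (f : Nat) (pth : List (Int × Int)) (w : String) (k : Int × Int)
    (rest : List (Nat × List (Int × Int) × String)) :
    pvStackMeasure (pvFuel dict)
        (((pvLookupMoves dict k).getD []).reverse.foldl
          (fun st c => if pth.contains c then st
                       else (f, pth ++ [c], w ++ pvBoardAt board c) :: st) rest)
      < pvStackMeasure (pvFuel dict) ((f + 1, pth, w) :: rest) := by
  have hlt := pvMoves_len_lt dict k
  have h := pvMeasure_push_lt (pvFuel dict) f (fun c => pth.contains c)
    (fun c => (f, pth ++ [c], w ++ pvBoardAt board c)) (fun _ => rfl)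
    ((pvLookupMoves dict k).getD []) rest (by omega)
  simp only [pvStackMeasure, List.map_cons, List.sum_cons] at h ⊢
  omega

-- the while loop of Source B: pop a state, prune, complete or push its children (in reverse, so
-- the first move is on top); lst is the growing result list the Python mutates
def pvLoopB (n : Int) (board : List (List String)) (dict : List (Int × Int × List (Int × Int)))
    (subwords words : List String) :
    List (Nat × List (Int × Int) × String) → List (List (Int × Int)) → List (List (Int × Int))
  | [], lst => lst
  | (0, _, _) :: rest, lst => pvLoopB n board dict subwords words rest lst
  | (f + 1, pth, w) :: rest, lst =>
    if ¬ subwords.contains w then pvLoopB n board dict subwords words rest lst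
    else if (pth.length : Int) = n then
      pvLoopB n board dict subwords words rest (if words.contains w then lst ++ [pth] else lst)
    else
      pvLoopB n board dict subwords words
        (((pvLookupMoves dict ((PySem.List.pyGet? pth (-1)).getD (0, 0))).getD []).reverse.foldl
          (fun st c => if pth.contains c then st
                       else (f, pth ++ [c], w ++ pvBoardAt board c) :: st) rest)
        lst
  termination_by st _ => pvStackMeasure (pvFuel dict) st
  decreasing_by
  · exact pvMeasure_cons_lt _ _ _
  · exact pvMeasure_cons_lt _ _ _
  · exact pvMeasure_cons_lt _ _ _
  · exact pvMeasure_expand_lt board dict f pth w _ rest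

def helper_n_paths_py_alt (path : List (Int × Int)) (n : Int) (board : List (List String)) (lst : List (List (Int × Int))) (dict_possible_moves : List (Int × Int × List (Int × Int))) (set_of_subwords : List String) (words : List String) (word : String) : Option (List (List (Int × Int))) :=
  if ¬ set_of_subwords.contains word then none
  else if (path.length : Int) = n then none
  else some (pvLoopB n board dict_possible_moves set_of_subwords words
               [(pvFuel dict_possible_moves, path, word)] lst)

-- ===== PRECONDITION & SPEC =====
-- Pre_ excludes exactly the inputs on which Python A raises: when the word passes the subword
-- check and the path is not yet of length n, the path must be nonempty with its last cell a
-- dict key (else IndexError/KeyError), and every coordinate reachable through a moves list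
-- must itself be a dict key and index into the board (else KeyError/IndexError deeper in the
-- recursion; slightly wider than the raising set when pruning cuts a branch first).
-- c is a key of the moves dict
def pvIsKey (d : List (Int × Int × List (Int × Int))) (c : Int × Int) : Bool :=
  d.any (fun e => (e.1, e.2.1) == c)

def Pre_helper_n_paths_py (path : List (Int × Int)) (n : Int) (board : List (List String)) (lst : List (List (Int × Int))) (dict_possible_moves : List (Int × Int × List (Int × Int))) (set_of_subwords : List String) (words : List String) (word : String) : Prop :=
  set_of_subwords.contains word = true →
    ((path.length : Int) = n ∨
      (path ≠ [] ∧ pvIsKey dict_possible_moves (path.getLastD (0, 0)) = true ∧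
       ∀ e ∈ dict_possible_moves, ∀ c ∈ e.2.2,
         pvIsKey dict_possible_moves c = true ∧
         PySem.Raise.InRange board.length c.1 ∧
         PySem.Raise.InRange (PySem.List.pyGetD board c.1 []).length c.2))
instance (path : List (Int × Int)) (n : Int) (board : List (List String)) (lst : List (List (Int × Int))) (dict_possible_moves : List (Int × Int × List (Int × Int))) (set_of_subwords : List String) (words : List String) (word : String) : Decidable (Pre_helper_n_paths_py path n board lst dict_possible_moves set_of_subwords words word) := by unfold Pre_helper_n_paths_py; infer_instance

def pvWitness_helper_n_paths_py : (List (Int × Int)) × Int × List (List String) × (List (List (Int × Int))) × (List (Int × Int × List (Int × Int))) × List String × List String × String :=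
  ([(0, 0)], 2, [["a", "b"], ["c", "d"]], [], [(0, 0, [(0, 1), (1, 0)]), (0, 1, []), (1, 0, [])], ["a", "ab", "ac"], ["ab", "ac"], "a")

def Spec_helper_n_paths_py (path : List (Int × Int)) (n : Int) (board : List (List String)) (lst : List (List (Int × Int))) (dict_possible_moves : List (Int × Int × List (Int × Int))) (set_of_subwords : List String) (words : List String) (word : String) (out : Option (List (List (Int × Int)))) : Prop := out = helper_n_paths_py_alt path n board lst dict_possible_moves set_of_subwords words word
instance (path : List (Int × Int)) (n : Int) (board : List (List String)) (lst : List (List (Int × Int))) (dict_possible_moves : List (Int × Int × List (Int × Int))) (set_of_subwords : List String) (words : List String) (word : String) (out : Option (List (List (Int × Int)))) : Decidable (Spec_helper_n_paths_py path n board lst dict_possible_moves set_of_subwords words word out) := by unfold Spec_helper_n_paths_py; infer_instance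

-- ===== CLAIM (what is proved, stated in full; the proofs are below) =====
def Claim_equal_helper_n_paths_py : Prop := ∀ (path : List (Int × Int)) (n : Int) (board : List (List String)) (lst : List (List (Int × Int))) (dict_possible_moves : List (Int × Int × List (Int × Int))) (set_of_subwords : List String) (words : List String) (word : String), Dom_helper_n_paths_py path n board lst dict_possible_moves set_of_subwords words word → Pre_helper_n_paths_py path n board lst dict_possible_moves set_of_subwords words word → Spec_helper_n_paths_py path n board lst dict_possible_moves set_of_subwords words word (helper_n_paths_py path n board lst dict_possible_moves set_of_subwords words word)

-- ===== LEMMAS AND PROOFS =====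

-- A's duplicate test on the extended path is membership of c in the old path
lemma valid_iff (path : List (Int × Int)) (c : Int × Int) :
    is_valid_path_n (path ++ [c]) = true ↔ c ∉ path := by
  unfold is_valid_path_n
  rw [PySem.List.pyGet?_neg_one_append_singleton]
  simp [PySem.List.count_eq, List.count_append, List.count_eq_zero]

-- processing the kept children of a state in order is A's foldl over its moves list
lemma children_foldl (n : Int) (board : List (List String))
    (dict : List (Int × Int × List (Int × Int))) (sw ws : List String)
    (f : Nat) (pth : List (Int × Int)) (w : String) :
    ∀ (moves : List (Int × Int)) (lst : List (List (Int × Int))),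
      (((moves.filter (fun c => ¬ pth.contains c)).map
          (fun c => (f, pth ++ [c], w ++ pvBoardAt board c))).foldl
        (fun acc e => pvDfsA n board dict sw ws e.1 e.2.1 acc e.2.2) lst)
        = moves.foldl
            (fun acc c =>
              if is_valid_path_n (pth ++ [c]) then
                pvDfsA n board dict sw ws f (pth ++ [c]) acc (w ++ pvBoardAt board c)
              else acc) lst := by
  intro moves
  induction moves with
  | nil => intro lst; rfl
  | cons c ms ih =>
    intro lst
    by_cases hc : c ∈ pth
    · have h1 : pth.contains c = true := List.elem_eq_true_of_mem hc
      have h2 : ¬ is_valid_path_n (pth ++ [c]) = true := by rw [valid_iff]; simp [hc]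
      simp only [List.filter_cons, h1, List.foldl_cons, if_neg h2]
      simpa using ih lst
    · have h1 : ¬ pth.contains c = true := by
        intro h; exact hc (List.mem_of_elem_eq_true h)
      have h2 : is_valid_path_n (pth ++ [c]) = true := (valid_iff pth c).mpr hc
      simp only [List.filter_cons, List.foldl_cons, if_pos h2]
      simp only [eq_false h1, Bool.not_false, if_pos rfl, List.map_cons, List.foldl_cons]
      exact ih _

-- main invariant: the explicit-stack loop processes its states left to right exactly as A's
-- recursion would, folding each state's pvDfsA over the growing result list
lemma loop_eq (n : Int) (board : List (List String))
    (dict : List (Int × Int × List (Int × Int))) (sw ws : List String) :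
    ∀ (st : List (Nat × List (Int × Int) × String)) (lst : List (List (Int × Int))),
      pvLoopB n board dict sw ws st lst
        = st.foldl (fun acc e => pvDfsA n board dict sw ws e.1 e.2.1 acc e.2.2) lst := by
  intro st
  induction hst : pvStackMeasure (pvFuel dict) st using Nat.strong_induction_on generalizing st with
  | _ m ih =>
  match st with
  | [] => intro lst; simp [pvLoopB]
  | (0, pth, w) :: rest =>
    intro lst
    have hm : pvStackMeasure (pvFuel dict) rest < m := hst ▸ pvMeasure_cons_lt _ _ _
    simp only [pvLoopB, List.foldl_cons]
    rw [ih _ hm rest rfl]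
    rfl
  | (f + 1, pth, w) :: rest =>
    intro lst
    have hm : pvStackMeasure (pvFuel dict) rest < m := hst ▸ pvMeasure_cons_lt _ _ _
    simp only [pvLoopB, List.foldl_cons]
    by_cases hA : sw.contains w = true
    · by_cases hB : (pth.length : Int) = n
      · -- completed path: appended iff the word is in words
        rw [if_neg (show ¬¬sw.contains w = true from not_not_intro hA), if_pos hB,
          ih _ hm rest rfl]
        have hA' : w ∈ sw := by simpa using hA
        congr 1
        simp [pvDfsA, hA', hB]
      · -- expansion: the pushed children, processed first, are A's foldl over the moves
        have hmlt : pvStackMeasure (pvFuel dict)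
            ((((pvLookupMoves dict ((PySem.List.pyGet? pth (-1)).getD (0, 0))).getD []).reverse).foldl
              (fun st c => if pth.contains c then st
                           else (f, pth ++ [c], w ++ pvBoardAt board c) :: st) rest) < m :=
          hst ▸ pvMeasure_expand_lt board dict f pth w _ rest
        rw [if_neg (show ¬¬sw.contains w = true from not_not_intro hA), if_neg hB,
          ih _ hmlt _ rfl,
          pvPush_eq (fun c => pth.contains c)
            (fun c => (f, pth ++ [c], w ++ pvBoardAt board c))
            ((pvLookupMoves dict ((PySem.List.pyGet? pth (-1)).getD (0, 0))).getD []) rest,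
          List.foldl_append, children_foldl n board dict sw ws f pth w]
        congr 1
        simp only [pvDfsA]
        rw [if_neg (show ¬¬sw.contains w = true from not_not_intro hA), if_neg hB]
    · -- the popped word fails the subword test: the state contributes nothing
      rw [if_pos hA, ih _ hm rest rfl]
      have hA' : w ∉ sw := by simpa using hA
      congr 1
      simp [pvDfsA, hA']

-- ===== VERDICT (by name: the statement is the Claim_ definition above) =====
theorem helper_n_paths_py_spec : Claim_equal_helper_n_paths_py := by
  intro path n board lst dict subwords words word _ _
  unfold Spec_helper_n_paths_py helper_n_paths_py helper_n_paths_py_alt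
  split_ifs with h1 h2
  · rfl
  · rw [loop_eq]
    rfl
  · rfl
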